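-- pv_equiv track=rewrite | github.com/Subhajit-git07/Leetcode | Leet_Final2.py | checkIf
-- ===== SOURCE A (Python) =====
-- def checkIf(s):
--     countOfA = 0
--     for i in range(len(s)-1, -1, -1):
--         if s[i] == "b":
--             if countOfA > 0:
--                 return False
--         else:
--             countOfA += 1
--     return True
-- ===== SOURCE B (Python) =====
-- def checkIf(s):
--     return "b" not in s.rstrip("b")
-- ===== Notes on version B (the rewrite author's own statement) =====
-- stated objective: faster
-- what changed: Replaced the explicit backward per-character counting loop with rstrip of the trailing run of the flagged character followed by a single substring-membership test (both C-level string operations).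
import Mathlib
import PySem

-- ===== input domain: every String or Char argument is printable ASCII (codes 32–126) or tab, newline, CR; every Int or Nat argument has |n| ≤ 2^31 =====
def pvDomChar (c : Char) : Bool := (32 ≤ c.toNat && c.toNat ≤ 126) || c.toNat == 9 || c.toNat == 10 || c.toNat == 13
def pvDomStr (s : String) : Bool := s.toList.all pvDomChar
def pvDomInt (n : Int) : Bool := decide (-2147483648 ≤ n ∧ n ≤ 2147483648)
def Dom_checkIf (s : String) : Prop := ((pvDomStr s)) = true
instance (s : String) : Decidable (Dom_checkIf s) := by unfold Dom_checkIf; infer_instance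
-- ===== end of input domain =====

-- B replaces A's backward counting loop with rstrip("b") plus a substring-membership test (idiomatic).

-- ===== PORT A =====
-- the backward loop 'for i in range(len(s)-1, -1, -1)' walks the reversed character list
def checkIfLoop : List Char → Int → Bool
  | [], _ => true
  | c :: rest, countOfA =>
    if c == 'b' then
      if countOfA > 0 then false else checkIfLoop rest countOfA
    else checkIfLoop rest (countOfA + 1)

def checkIf (s : String) : Bool := checkIfLoop s.toList.reverse 0

-- ===== PORT B =====
-- s.rstrip("b") ported by hand (PySem has no rstrip-with-chars): drop the trailing run of 'b';
-- exact for a single-character strip set. '"b" in t' is PySem.Chars.isIn.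
def checkIf_alt (s : String) : Bool :=
  let t := (s.toList.reverse.dropWhile (· == 'b')).reverse
  !PySem.Chars.isIn ['b'] t

-- ===== PRECONDITION & SPEC =====
def Spec_checkIf (s : String) (out : Bool) : Prop := out = checkIf_alt s
instance (s : String) (out : Bool) : Decidable (Spec_checkIf s out) := by unfold Spec_checkIf; infer_instance

-- ===== CLAIM (what is proved, stated in full; the proofs are below) =====
def Claim_equal_checkIf : Prop := ∀ (s : String), Dom_checkIf s → Spec_checkIf s (checkIf s)

-- ===== LEMMAS AND PROOFS =====

-- once a non-'b' has been counted, the loop returns false iff a 'b' remains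
theorem checkIfLoop_pos (l : List Char) (n : Int) (hn : 0 < n) :
    checkIfLoop l n = !l.contains 'b' := by
  induction l generalizing n with
  | nil => simp [checkIfLoop]
  | cons c rest ih =>
    by_cases hc : c = 'b'
    · subst hc; simp [checkIfLoop, hn]
    · simp only [checkIfLoop, beq_iff_eq, if_neg hc, ih (n + 1) (by omega), List.contains_cons]
      simp [Ne.symm hc]

theorem checkIfLoop_zero (l : List Char) :
    checkIfLoop l 0 = !(l.dropWhile (· == 'b')).contains 'b' := by
  induction l with
  | nil => simp [checkIfLoop]
  | cons c rest ih =>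
    by_cases hc : c = 'b'
    · subst hc; simpa [checkIfLoop, List.dropWhile] using ih
    · simp only [checkIfLoop, beq_iff_eq, if_neg hc, List.dropWhile_cons, List.contains_cons]
      rw [checkIfLoop_pos rest (0 + 1) (by omega)]
      simp [Ne.symm hc]

theorem isIn_singleton (a : Char) (l : List Char) :
    PySem.Chars.isIn [a] l = l.contains a := by
  rcases h : PySem.Chars.isIn [a] l with _ | _
  · rw [PySem.Chars.isIn_eq_false_iff] at h
    symm; simp only [List.contains_eq_mem, decide_eq_false_iff_not]
    intro hm
    exact h (List.infix_iff_prefix_suffix.mpr (by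
      obtain ⟨l1, l2, rfl⟩ := List.append_of_mem hm
      exact ⟨[a] ++ l2, List.prefix_append _ _, by simp⟩))
  · rw [PySem.Chars.isIn_iff_infix] at h
    symm; simp only [List.contains_eq_mem, decide_eq_true_eq]
    exact h.subset (by simp)

-- ===== VERDICT (by name: the statement is the Claim_ definition above) =====
theorem checkIf_spec : Claim_equal_checkIf := by
  intro s _
  unfold Spec_checkIf checkIf checkIf_alt
  simp only [checkIfLoop_zero, isIn_singleton]
  simp
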